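-- pv_equiv track=rewrite | github.com/PepeRay/yt-factory-comfy-worker | handler_video.py | _swap_nvenc_for_x264
-- ===== SOURCE A (Python) =====
-- _X264_HQ_FALLBACK = [
--     "-c:v", "libx264", "-preset", "fast", "-crf", "18", "-pix_fmt", "yuv420p",
-- ]
--
-- _X264_NORM_FALLBACK = [
--     "-c:v", "libx264", "-preset", "fast", "-crf", "26", "-pix_fmt", "yuv420p",
-- ]
--
-- def _swap_nvenc_for_x264(cmd):
--     """Return a new cmd list with h264_nvenc args replaced by libx264 equivalents.
--     Handles both HQ and NORM presets by detecting the -cq value."""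
--     new_cmd = []
--     i = 0
--     # Quick pass: find the NVENC block bounds (from "-c:v" "h264_nvenc" to
--     # the last NVENC-specific flag). We do a token-by-token rewrite: any
--     # occurrence of "h264_nvenc" triggers replacement of the surrounding
--     # encoder flags with the libx264 equivalent.
--     #
--     # Strategy: copy tokens through, but when we see -c:v h264_nvenc, skip
--     # all encoder-related flags that follow and splice in the x264 fallback.
--     nvenc_encoder_flags = {
--         "-c:v", "-preset", "-tune", "-rc", "-cq", "-b:v",
--         "-pix_fmt", "-profile:v", "-spatial-aq", "-temporal-aq",
--         "-rc-lookahead", "-bf",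
--     }
--     # Detect whether this command uses HQ or NORM by scanning for cq value
--     fallback = _X264_HQ_FALLBACK
--     try:
--         cq_idx = cmd.index("-cq")
--         if cmd[cq_idx + 1] == "23":
--             fallback = _X264_NORM_FALLBACK
--     except (ValueError, IndexError):
--         pass
--
--     swapped = False
--     while i < len(cmd):
--         tok = cmd[i]
--         if not swapped and tok == "-c:v" and i + 1 < len(cmd) and cmd[i + 1] == "h264_nvenc":
--             new_cmd.extend(fallback)
--             i += 2
--             # Skip any subsequent NVENC encoder flags (they come in -flag value pairs)
--             while i < len(cmd) and cmd[i] in nvenc_encoder_flags: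
--                 # Skip flag + value
--                 i += 2
--             swapped = True
--             continue
--         new_cmd.append(tok)
--         i += 1
--     return new_cmd
-- ===== SOURCE B (Python) =====
-- _X264_HQ_FALLBACK = [
--     "-c:v", "libx264", "-preset", "fast", "-crf", "18", "-pix_fmt", "yuv420p",
-- ]
--
-- _X264_NORM_FALLBACK = [
--     "-c:v", "libx264", "-preset", "fast", "-crf", "26", "-pix_fmt", "yuv420p",
-- ]
--
-- _NVENC_FLAGS = frozenset([
--     "-c:v", "-preset", "-tune", "-rc", "-cq", "-b:v",
--     "-pix_fmt", "-profile:v", "-spatial-aq", "-temporal-aq",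
--     "-rc-lookahead", "-bf",
-- ])
--
--
-- def _pick_fallback(cmd):
--     """NORM fallback iff the value after the first '-cq' is '23', else HQ."""
--     if "-cq" in cmd:
--         j = cmd.index("-cq")
--         if j + 1 < len(cmd) and cmd[j + 1] == "23":
--             return _X264_NORM_FALLBACK
--     return _X264_HQ_FALLBACK
--
--
-- def _find_nvenc(cmd):
--     """Index of the first '-c:v' immediately followed by 'h264_nvenc', or None."""
--     for k in range(len(cmd) - 1):
--         if cmd[k] == "-c:v" and cmd[k + 1] == "h264_nvenc":
--             return k
--     return None
--
--
-- def _swap_nvenc_for_x264(cmd):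
--     start = _find_nvenc(cmd)
--     if start is None:
--         return list(cmd)
--     end = start + 2
--     while end < len(cmd) and cmd[end] in _NVENC_FLAGS:
--         end += 2  # skip flag + value
--     return cmd[:start] + _pick_fallback(cmd) + cmd[end:]
-- ===== Notes on version B (the rewrite author's own statement) =====
-- stated objective: simpler
-- what changed: Instead of a token-by-token copy loop with a 'swapped' flag, B locates the bounds of the first NVENC block as two indices and returns cmd[:start] + fallback + cmd[end:] by slicing.
import Mathlib
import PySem

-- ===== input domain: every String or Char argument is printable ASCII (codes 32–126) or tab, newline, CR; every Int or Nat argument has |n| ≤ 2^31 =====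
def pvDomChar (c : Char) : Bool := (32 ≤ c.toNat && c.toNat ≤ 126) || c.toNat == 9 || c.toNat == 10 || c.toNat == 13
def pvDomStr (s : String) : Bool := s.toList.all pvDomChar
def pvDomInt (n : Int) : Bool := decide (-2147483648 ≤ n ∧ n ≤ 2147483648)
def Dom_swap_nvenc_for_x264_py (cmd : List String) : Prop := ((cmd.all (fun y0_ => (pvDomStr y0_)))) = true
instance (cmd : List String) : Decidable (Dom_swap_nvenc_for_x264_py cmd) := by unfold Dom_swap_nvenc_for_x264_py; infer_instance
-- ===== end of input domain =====

-- B replaces A's token-by-token copy loop (with a 'swapped' flag) by computing the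
-- bounds of the first NVENC block and splicing with take/drop slices; same result, simpler.

-- module constants shared by both Python versions
def pvX264HQ : List String :=
  ["-c:v", "libx264", "-preset", "fast", "-crf", "18", "-pix_fmt", "yuv420p"]
def pvX264NORM : List String :=
  ["-c:v", "libx264", "-preset", "fast", "-crf", "26", "-pix_fmt", "yuv420p"]

-- ===== PORT A =====
def pvNvencFlagsA : List String :=
  ["-c:v", "-preset", "-tune", "-rc", "-cq", "-b:v",
   "-pix_fmt", "-profile:v", "-spatial-aq", "-temporal-aq",
   "-rc-lookahead", "-bf"]

-- cmd.index("-cq") / cmd[cq_idx+1], ValueError/IndexError swallowed → HQ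
def pvFallbackA (cmd : List String) : List String :=
  match PySem.List.index? cmd "-cq" with
  | none => pvX264HQ
  | some j =>
    match PySem.List.pyGet? cmd ((j : Int) + 1) with
    | none => pvX264HQ
    | some v => if v = "23" then pvX264NORM else pvX264HQ

-- the inner 'while i < len(cmd) and cmd[i] in nvenc_encoder_flags: i += 2'
def pvSkipA (cmd : List String) (i : Nat) : Nat :=
  if h : i < cmd.length ∧ pvNvencFlagsA.contains (cmd.getD i "") then pvSkipA cmd (i + 2)
  else i
termination_by cmd.length - i
decreasing_by omega

theorem pvSkipA_ge (cmd : List String) (i : Nat) : i ≤ pvSkipA cmd i := by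
  unfold pvSkipA
  split
  · have := pvSkipA_ge cmd (i + 2); omega
  · exact le_refl i
termination_by cmd.length - i
decreasing_by omega

-- the outer 'while i < len(cmd)' loop
def pvLoopA (cmd fb : List String) (i : Nat) (swapped : Bool) (acc : List String) : List String :=
  if h : i < cmd.length then
    let tok := cmd.getD i ""
    if swapped = false ∧ tok = "-c:v" ∧ i + 1 < cmd.length ∧ cmd.getD (i + 1) "" = "h264_nvenc" then
      pvLoopA cmd fb (pvSkipA cmd (i + 2)) true (acc ++ fb)
    else
      pvLoopA cmd fb (i + 1) swapped (acc ++ [tok])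
  else acc
termination_by cmd.length - i
decreasing_by
  · have := pvSkipA_ge cmd (i + 2); omega
  · omega

def swap_nvenc_for_x264_py (cmd : List String) : List String :=
  pvLoopA cmd (pvFallbackA cmd) 0 false []

-- ===== PORT B =====
def pvNvencFlagsB : List String :=
  ["-c:v", "-preset", "-tune", "-rc", "-cq", "-b:v",
   "-pix_fmt", "-profile:v", "-spatial-aq", "-temporal-aq",
   "-rc-lookahead", "-bf"]

-- _pick_fallback
def pvFallbackB (cmd : List String) : List String :=
  if cmd.contains "-cq" then
    match PySem.List.index? cmd "-cq" with
    | some j => if j + 1 < cmd.length ∧ cmd.getD (j + 1) "" = "23" then pvX264NORM else pvX264HQ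
    | none => pvX264HQ
  else pvX264HQ

-- _find_nvenc: first k with cmd[k] = "-c:v" and cmd[k+1] = "h264_nvenc"
def pvFindB (cmd : List String) (k : Nat) : Option Nat :=
  if h : k + 1 < cmd.length then
    if cmd.getD k "" = "-c:v" ∧ cmd.getD (k + 1) "" = "h264_nvenc" then some k
    else pvFindB cmd (k + 1)
  else none
termination_by cmd.length - k
decreasing_by omega

-- 'while end < len(cmd) and cmd[end] in _NVENC_FLAGS: end += 2'
def pvEndB (cmd : List String) (e : Nat) : Nat :=
  if h : e < cmd.length ∧ pvNvencFlagsB.contains (cmd.getD e "") then pvEndB cmd (e + 2)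
  else e
termination_by cmd.length - e
decreasing_by omega

def swap_nvenc_for_x264_py_alt (cmd : List String) : List String :=
  match pvFindB cmd 0 with
  | none => cmd
  | some s => cmd.take s ++ pvFallbackB cmd ++ cmd.drop (pvEndB cmd (s + 2))

-- ===== PRECONDITION & SPEC =====
def Spec_swap_nvenc_for_x264_py (cmd : List String) (out : List String) : Prop := out = swap_nvenc_for_x264_py_alt cmd
instance (cmd : List String) (out : List String) : Decidable (Spec_swap_nvenc_for_x264_py cmd out) := by unfold Spec_swap_nvenc_for_x264_py; infer_instance

-- ===== CLAIM (what is proved, stated in full; the proofs are below) =====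
def Claim_equal_swap_nvenc_for_x264_py : Prop := ∀ (cmd : List String), Dom_swap_nvenc_for_x264_py cmd → Spec_swap_nvenc_for_x264_py cmd (swap_nvenc_for_x264_py cmd)

-- ===== LEMMAS AND PROOFS =====

theorem pvEndB_eq_skipA (cmd : List String) (i : Nat) : pvEndB cmd i = pvSkipA cmd i := by
  unfold pvEndB pvSkipA
  have hAB : pvNvencFlagsB = pvNvencFlagsA := rfl
  rw [hAB]
  by_cases h : i < cmd.length ∧ pvNvencFlagsA.contains (cmd.getD i "") = true
  · rw [dif_pos h, dif_pos h]
    exact pvEndB_eq_skipA cmd (i + 2)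
  · rw [dif_neg h, dif_neg h]
termination_by cmd.length - i
decreasing_by omega

theorem pvFallbackB_eq (cmd : List String) : pvFallbackB cmd = pvFallbackA cmd := by
  unfold pvFallbackA pvFallbackB
  rw [PySem.List.index?_eq_idxOf?]
  cases hidx : List.idxOf? "-cq" cmd with
  | none =>
    have hmem : "-cq" ∉ cmd := List.idxOf?_eq_none_iff.mp hidx
    simp [hmem]
  | some j =>
    have hmem : "-cq" ∈ cmd := by
      by_contra hmem
      rw [List.idxOf?_eq_none_iff.mpr hmem] at hidx
      cases hidx
    simp only [List.contains_eq_mem, decide_eq_true_eq, hmem, if_pos]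
    have hcast : ((j : Int) + 1) = ((j + 1 : Nat) : Int) := by push_cast; ring
    rw [hcast, PySem.List.pyGet?_natCast]
    by_cases hlt : j + 1 < cmd.length
    · rw [List.getElem?_eq_getElem hlt]
      simp [hlt]
    · rw [List.getElem?_eq_none (by omega)]
      simp [hlt]

theorem pvLoopA_swapped (cmd fb : List String) (i : Nat) (acc : List String) :
    pvLoopA cmd fb i true acc = acc ++ cmd.drop i := by
  unfold pvLoopA
  split
  · rename_i h
    rw [if_neg (show ¬((true = false) ∧ cmd.getD i "" = "-c:v" ∧ i + 1 < cmd.length ∧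
        cmd.getD (i + 1) "" = "h264_nvenc") from fun hc => by cases hc.1)]
    rw [pvLoopA_swapped cmd fb (i + 1) (acc ++ [cmd.getD i ""])]
    rw [List.drop_eq_getElem_cons h, List.getD_eq_getElem cmd "" h]
    simp
  · rename_i h
    rw [List.drop_of_length_le (by omega)]
    simp
termination_by cmd.length - i
decreasing_by omega

theorem pvFindB_ge (cmd : List String) (k : Nat) (s : Nat) (h : pvFindB cmd k = some s) : k ≤ s := by
  unfold pvFindB at h
  split at h
  · split at h
    · injection h with h'
      omega
    · have := pvFindB_ge cmd (k + 1) s h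
      omega
  · cases h
termination_by cmd.length - k
decreasing_by omega

theorem pvLoopA_main (cmd fb : List String) (i : Nat) (acc : List String) :
    pvLoopA cmd fb i false acc =
      match pvFindB cmd i with
      | none => acc ++ cmd.drop i
      | some s => acc ++ (cmd.drop i).take (s - i) ++ fb ++ cmd.drop (pvSkipA cmd (s + 2)) := by
  by_cases hlen : i < cmd.length
  · have htok : cmd.getD i "" = cmd[i] := List.getD_eq_getElem cmd "" hlen
    by_cases hm : cmd.getD i "" = "-c:v" ∧ i + 1 < cmd.length ∧ cmd.getD (i + 1) "" = "h264_nvenc"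
    · -- the NVENC block starts exactly at i
      have hfind : pvFindB cmd i = some i := by
        rw [pvFindB]
        rw [dif_pos hm.2.1, if_pos ⟨hm.1, hm.2.2⟩]
      rw [hfind]
      have hcond : (false = false) ∧ cmd.getD i "" = "-c:v" ∧ i + 1 < cmd.length ∧
          cmd.getD (i + 1) "" = "h264_nvenc" := ⟨rfl, hm⟩
      conv_lhs => rw [pvLoopA]
      rw [dif_pos hlen]
      rw [if_pos hcond]
      rw [pvLoopA_swapped]
      simp
    · -- no block starting at i: copy the token through
      have hfind : pvFindB cmd i = pvFindB cmd (i + 1) := by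
        conv_lhs => rw [pvFindB]
        by_cases h2 : i + 1 < cmd.length
        · have hnc : ¬(cmd.getD i "" = "-c:v" ∧ cmd.getD (i + 1) "" = "h264_nvenc") :=
            fun hc => hm ⟨hc.1, h2, hc.2⟩
          rw [dif_pos h2, if_neg hnc]
        · rw [dif_neg h2]
          conv_rhs => rw [pvFindB]
          rw [dif_neg (show ¬(i + 1 + 1 < cmd.length) from by omega)]
      have hncond : ¬((false = false) ∧ cmd.getD i "" = "-c:v" ∧ i + 1 < cmd.length ∧
          cmd.getD (i + 1) "" = "h264_nvenc") := fun hc => hm hc.2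
      have hstep : pvLoopA cmd fb i false acc = pvLoopA cmd fb (i + 1) false (acc ++ [cmd.getD i ""]) := by
        conv_lhs => rw [pvLoopA]
        rw [dif_pos hlen, if_neg hncond]
      rw [hstep, pvLoopA_main cmd fb (i + 1) (acc ++ [cmd.getD i ""]), hfind]
      have hdrop : cmd.drop i = cmd[i] :: cmd.drop (i + 1) := List.drop_eq_getElem_cons hlen
      cases hf : pvFindB cmd (i + 1) with
      | none =>
        show acc ++ [cmd.getD i ""] ++ List.drop (i + 1) cmd = acc ++ List.drop i cmd
        rw [htok, hdrop]
        simp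
      | some s =>
        have hs : i + 1 ≤ s := pvFindB_ge cmd (i + 1) s hf
        have htake : (cmd.drop i).take (s - i) = cmd[i] :: (cmd.drop (i + 1)).take (s - (i + 1)) := by
          rw [hdrop, show s - i = (s - (i + 1)) + 1 from by omega, List.take_succ_cons]
        show acc ++ [cmd.getD i ""] ++ List.take (s - (i + 1)) (List.drop (i + 1) cmd) ++ fb ++
            List.drop (pvSkipA cmd (s + 2)) cmd =
          acc ++ List.take (s - i) (List.drop i cmd) ++ fb ++ List.drop (pvSkipA cmd (s + 2)) cmd
        rw [htok, htake]
        simp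
  · -- i past the end
    have hfind : pvFindB cmd i = none := by
      rw [pvFindB]
      rw [dif_neg (by omega)]
    rw [hfind]
    rw [pvLoopA]
    rw [dif_neg hlen, List.drop_of_length_le (by omega)]
    simp
termination_by cmd.length - i
decreasing_by omega

-- ===== VERDICT (by name: the statement is the Claim_ definition above) =====
theorem swap_nvenc_for_x264_py_spec : Claim_equal_swap_nvenc_for_x264_py := by
  intro cmd _
  unfold Spec_swap_nvenc_for_x264_py swap_nvenc_for_x264_py swap_nvenc_for_x264_py_alt
  rw [pvLoopA_main]
  cases hf : pvFindB cmd 0 with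
  | none => simp
  | some s => simp [pvFallbackB_eq, pvEndB_eq_skipA]
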